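-- pv_equiv track=rewrite | github.com/ekek54/BaekJoon_Python | 백준/Gold/9489. 사촌/사촌.py | search_cousin
-- ===== SOURCE A (Python) =====
-- from collections import deque
--
-- def my_parent(tree: dict, me):
--   for parent, childs in tree.items():
--     if me in childs:
--       return parent
--
-- def my_grandparent(tree, me):
--   return my_parent(tree, my_parent(tree, me))
--
-- def search_cousin(tree, root, me):
--   que = deque()
--   que.append((0, 0, root))
--   grandparent = my_grandparent(tree, me)
--   parent = my_parent(tree, me)
--   cnt = 0
--   while que:
--     cur_grandparent, cur_parent, cur = que.popleft()
--     if cur_grandparent == grandparent and cur_parent != parent: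
--       cnt += 1
--     if cur in tree:
--       for child in tree[cur]:
--         nxt = (cur_parent, cur, child)
--         que.append(nxt)
--   return cnt
-- ===== SOURCE B (Python) =====
-- def my_parent(tree: dict, me):
--   for parent, childs in tree.items():
--     if me in childs:
--       return parent
--
--
-- def search_cousin(tree, root, me):
--   parent = my_parent(tree, me)
--   grandparent = my_parent(tree, parent)  # my_parent(tree, None) is None: no child list holds None
--   total = 0
--   for c in tree.get(grandparent, []):
--     if c != parent:
--       total += len(tree.get(c, []))
--   return total
-- ===== Notes on version B (the rewrite author's own statement) =====
-- stated objective: simpler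
-- what changed: Replaces the whole-tree BFS (queue of (grandparent,parent,node) triples scanned from the root) by a local computation: look up me's parent and grandparent once and sum the child-list lengths of the grandparent's other children.
-- intended difference: On inputs whose me's grandparent is the node 0 (D_), A's 0-sentinels collide with the real node: A also counts the root and every child of the root as cousins, while B returns only the true cousin count, which is the intended value. — e.g. on search_cousin([(0, [1]), (1, [2])], 0, 2): A returns 2, B returns 0
-- outside the precondition, e.g. on search_cousin({5: [6, 8], 8: [9], 6: [7]}, 0, 7): A returns 0, B returns 1; on search_cousin({9: [5, 5], 5: [1, 3], 1: [2], 3: [4]}, 9, 2): A returns 2, B returns 1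
import Mathlib
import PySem

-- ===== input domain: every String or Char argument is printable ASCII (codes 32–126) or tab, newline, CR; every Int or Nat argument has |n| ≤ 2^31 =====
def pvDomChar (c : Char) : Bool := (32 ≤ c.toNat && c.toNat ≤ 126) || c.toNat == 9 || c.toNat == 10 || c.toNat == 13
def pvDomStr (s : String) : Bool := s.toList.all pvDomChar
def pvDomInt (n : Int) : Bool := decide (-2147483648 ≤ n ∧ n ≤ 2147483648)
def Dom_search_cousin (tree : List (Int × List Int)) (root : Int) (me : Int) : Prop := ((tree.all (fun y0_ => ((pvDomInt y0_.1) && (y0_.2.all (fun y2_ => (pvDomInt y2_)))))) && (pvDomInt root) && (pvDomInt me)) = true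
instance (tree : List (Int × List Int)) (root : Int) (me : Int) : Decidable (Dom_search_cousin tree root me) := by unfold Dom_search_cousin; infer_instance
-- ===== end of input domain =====

-- B replaces A's whole-tree BFS by a local sum over the grandparent's other children's child lists (simpler and no traversal);
-- on the corner where me's grandparent is the literal node 0, A's 0-sentinels collide with it and A overcounts — stated as D_ below.

-- ===== PORT A =====
-- first-match association-list lookup = Python dict `tree[k]` / `k in tree` (exact: dict keys are unique ints)
def dget? : List (Int × List Int) → Int → Option (List Int)
  | [], _ => none
  | (k, v) :: t, x => if k = x then some v else dget? t x

-- literal port of my_parent: scan items, return first key whose child list holds me, else None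
def myParent : List (Int × List Int) → Int → Option Int
  | [], _ => none
  | (parent, childs) :: t, me => if me ∈ childs then some parent else myParent t me

-- my_grandparent(tree, me) = my_parent(tree, my_parent(tree, me)); when the inner call is None the outer
-- scan finds nothing (child lists hold ints, never None) and returns None — the match encodes exactly that
def myGrandparent (tree : List (Int × List Int)) (me : Int) : Option Int :=
  match myParent tree me with
  | none => none
  | some p => myParent tree p

-- the while-queue loop, step for step (popleft; count check; push (cur_parent, cur, child) for each child)
def bfsLoop (tree : List (Int × List Int)) (grandparent parent : Option Int) :
    Nat → Int → List (Int × Int × Int) → Int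
  | 0, cnt, _ => cnt
  | _ + 1, cnt, [] => cnt
  | fuel + 1, cnt, (cur_grandparent, cur_parent, cur) :: que =>
    let cnt' := if (some cur_grandparent == grandparent) && !(some cur_parent == parent) then cnt + 1 else cnt
    match dget? tree cur with
    | some childs => bfsLoop tree grandparent parent fuel cnt' (que ++ childs.map (fun child => (cur_parent, cur, child)))
    | none => bfsLoop tree grandparent parent fuel cnt' que

-- fuel Π(|childs|+1) is a totality guard only: it bounds the number of BFS pops on every Pre_-input
def search_cousin (tree : List (Int × List Int)) (root : Int) (me : Int) : Int :=
  let grandparent := myGrandparent tree me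
  let parent := myParent tree me
  bfsLoop tree grandparent parent ((tree.map (fun e => e.2.length + 1)).prod) 0 [(0, 0, root)]

-- ===== PORT B =====
def search_cousin_alt (tree : List (Int × List Int)) (root : Int) (me : Int) : Int :=
  let parent := myParent tree me
  let grandparent := match parent with | none => none | some p => myParent tree p
  -- tree.get(grandparent, []): a None key matches nothing, so the None case yields []
  let gcs := match grandparent with | none => ([] : List Int) | some g => (dget? tree g).getD []
  gcs.foldl (fun total c => if some c == parent then total else total + ((dget? tree c).getD []).length) 0

-- ===== PRECONDITION & SPEC =====
-- spec-side first-match parent lookup (independent of the ports)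
def pvParent (t : List (Int × List Int)) (x : Int) : Option Int :=
  (t.find? (fun e => decide (x ∈ e.2))).map Prod.fst

def pvGrand (t : List (Int × List Int)) (me : Int) : Option Int :=
  (pvParent t me).bind (fun p => pvParent t p)

-- depth of a node below root along the unique parent chain (fuel t.length+1 covers every chain that
-- ever reaches root: a longer chain would repeat a key, i.e. lie on a cycle and never reach root)
def pvDepth (t : List (Int × List Int)) (root : Int) : Nat → Int → Option Nat
  | 0, _ => none
  | f + 1, k =>
    if k = root then some 0
    else match pvParent t k with
      | some p => (pvDepth t root f p).map (· + 1)
      | none => none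

-- the dict is a proper tree rooted at root: unique keys, each node at most one parent occurrence,
-- root is nobody's child, and every key's parent chain reaches root
def GoodTree (t : List (Int × List Int)) (root : Int) : Prop :=
  (t.map Prod.fst).Nodup ∧ ((t.map Prod.snd).flatten).Nodup ∧
    root ∉ (t.map Prod.snd).flatten ∧
    ∀ k ∈ t.map Prod.fst, (pvDepth t root (t.length + 1) k).isSome

-- Pre_ excludes inputs on which A still returns a value but the dict is not a tree rooted at root
-- (duplicate parents, cycles — on which A may even diverge — or keys unreachable from root): there A's
-- BFS-from-root count is an artefact of what its queue happens to reach and revisit, not a cousin count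
-- (see the excluded examples); the harmless degenerate case where root keys nothing and me has no
-- grandparent (both programs return 0) stays admitted.
def Pre_search_cousin (tree : List (Int × List Int)) (root : Int) (me : Int) : Prop :=
  GoodTree tree root ∨ (pvGrand tree me = none ∧ root ∉ tree.map Prod.fst)
instance (tree : List (Int × List Int)) (root : Int) (me : Int) : Decidable (Pre_search_cousin tree root me) := by
  unfold Pre_search_cousin GoodTree; infer_instance

def pvWitness_search_cousin : (List (Int × List Int)) × Int × Int := ([(1, [2]), (2, [3])], 1, 3)

-- On inputs whose me's grandparent is the node 0, A's 0-sentinel queue seeds collide with the real node: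
-- A additionally counts the root and all of root's children as cousins, while B returns the true cousin
-- count (nodes with grandparent 0 and a different parent), which is the intended value.
def D_search_cousin (tree : List (Int × List Int)) (root : Int) (me : Int) : Prop :=
  pvGrand tree me = some 0
instance (tree : List (Int × List Int)) (root : Int) (me : Int) : Decidable (D_search_cousin tree root me) := by
  unfold D_search_cousin; infer_instance

def Spec_search_cousin (tree : List (Int × List Int)) (root : Int) (me : Int) (out : Int) : Prop :=
  ¬ D_search_cousin tree root me → out = search_cousin_alt tree root me
instance (tree : List (Int × List Int)) (root : Int) (me : Int) (out : Int) : Decidable (Spec_search_cousin tree root me out) := by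
  unfold Spec_search_cousin; infer_instance

def pvDiffWitness_search_cousin : (List (Int × List Int)) × Int × Int := ([(0, [1]), (1, [2])], 0, 2)
def pvDiffWitnessOut_search_cousin : Int × Int := (2, 0)

-- ===== CLAIM (what is proved, stated in full; the proofs are below) =====
def Claim_unchanged_search_cousin : Prop := ∀ (tree : List (Int × List Int)) (root : Int) (me : Int), Dom_search_cousin tree root me → Pre_search_cousin tree root me → Spec_search_cousin tree root me (search_cousin tree root me)
def Claim_changed_search_cousin : Prop := Dom_search_cousin (pvDiffWitness_search_cousin.1) (pvDiffWitness_search_cousin.2.1) (pvDiffWitness_search_cousin.2.2) ∧ Pre_search_cousin (pvDiffWitness_search_cousin.1) (pvDiffWitness_search_cousin.2.1) (pvDiffWitness_search_cousin.2.2) ∧ D_search_cousin (pvDiffWitness_search_cousin.1) (pvDiffWitness_search_cousin.2.1) (pvDiffWitness_search_cousin.2.2) ∧ search_cousin (pvDiffWitness_search_cousin.1) (pvDiffWitness_search_cousin.2.1) (pvDiffWitness_search_cousin.2.2) = pvDiffWitnessOut_search_cousin.1 ∧ search_cousin_alt (pvDiffWitness_search_cousin.1) (pvDiffWitness_search_cousin.2.1)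 (pvDiffWitness_search_cousin.2.2) = pvDiffWitnessOut_search_cousin.2 ∧ pvDiffWitnessOut_search_cousin.1 ≠ pvDiffWitnessOut_search_cousin.2
def Claim_exact_search_cousin : Prop := ∀ (tree : List (Int × List Int)) (root : Int) (me : Int), Dom_search_cousin tree root me → Pre_search_cousin tree root me → D_search_cousin tree root me → search_cousin tree root me ≠ search_cousin_alt tree root me

-- ===== LEMMAS AND PROOFS =====

-- a proper forest hanging off root, as the older machinery states it (derived from GoodTree below)
def TreeShape (t : List (Int × List Int)) (root : Int) : Prop :=
  (t.map Prod.fst).Nodup ∧ ((t.map Prod.snd).flatten).Nodup ∧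
    root ∉ (t.map Prod.snd).flatten ∧
    ∀ k ∈ t.map Prod.fst, k = root ∨ k ∈ (t.map Prod.snd).flatten

-- the child graph is forward-ordered (a key never occurs in its own or an earlier entry's child list)
def TopoOK (t : List (Int × List Int)) : Prop :=
  List.Pairwise (fun a b => a.1 ∉ b.2) t ∧ ∀ e ∈ t, e.1 ∉ e.2

-- number of BFS pops starting at cur, lookups restricted to a suffix of the tree (proof-side measure)
def nV : List (Int × List Int) → Int → Nat
  | [], _ => 1
  | (k, cs) :: l, cur => if k = cur then 1 + (cs.map (fun c => nV l c)).sum else nV l cur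

-- contribution of one popped triple to cnt
def hit (grandparent parent : Option Int) (e : Int × Int × Int) : Int :=
  if (some e.1 == grandparent) && !(some e.2.1 == parent) then 1 else 0

-- total cnt contributed by a queue entry, lookups restricted to a suffix of the tree
def wsum (grandparent parent : Option Int) : List (Int × List Int) → (Int × Int × Int) → Int
  | [], e => hit grandparent parent e
  | (k, cs) :: l, (gp, par, cur) =>
    if k = cur then hit grandparent parent (gp, par, cur) + (cs.map (fun c => wsum grandparent parent l (par, cur, c))).sum
    else wsum grandparent parent l (gp, par, cur)

-- the canonical triple a node is popped with (0-sentinels where a parent is missing)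
def canTrip (t : List (Int × List Int)) (x : Int) : Int × Int × Int :=
  (((pvParent t x).bind (fun p => pvParent t p)).getD 0, (pvParent t x).getD 0, x)

lemma myParent_eq_pv (t : List (Int × List Int)) (x : Int) : myParent t x = pvParent t x := by
  induction t with
  | nil => rfl
  | cons e t ih =>
    obtain ⟨p, cs⟩ := e
    by_cases h : x ∈ cs <;> simp [myParent, pvParent, List.find?_cons, h] <;>
      simpa [pvParent] using ih

lemma nV_pos (l : List (Int × List Int)) (c : Int) : 1 ≤ nV l c := by
  induction l generalizing c with
  | nil => simp [nV]
  | cons e l ih =>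
    obtain ⟨k, cs⟩ := e
    by_cases h : k = c <;> simp [nV, h]
    exact ih c

lemma prodFuel_pos (t : List (Int × List Int)) : 0 < (t.map (fun e => e.2.length + 1)).prod := by
  refine List.prod_pos fun x hx => ?_
  rcases List.mem_map.mp hx with ⟨e, _, rfl⟩
  omega

lemma nV_le_prod (l : List (Int × List Int)) (c : Int) :
    nV l c ≤ (l.map (fun e => e.2.length + 1)).prod := by
  induction l generalizing c with
  | nil => simp [nV]
  | cons e l ih =>
    obtain ⟨k, cs⟩ := e
    have hP : 0 < (l.map (fun e => e.2.length + 1)).prod := prodFuel_pos l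
    by_cases h : k = c
    · simp only [nV, h, if_true, List.map_cons, List.prod_cons]
      have hsum : (cs.map (fun c => nV l c)).sum ≤ cs.length * (l.map (fun e => e.2.length + 1)).prod := by
        have := List.sum_le_card_nsmul (cs.map (fun c => nV l c)) ((l.map (fun e => e.2.length + 1)).prod)
          (by intro x hx; rcases List.mem_map.mp hx with ⟨c', _, rfl⟩; exact ih c')
        simpa [smul_eq_mul] using this
      calc 1 + (cs.map (fun c => nV l c)).sum ≤ 1 + cs.length * (l.map (fun e => e.2.length + 1)).prod := by omega
        _ ≤ (cs.length + 1) * (l.map (fun e => e.2.length + 1)).prod := by nlinarith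
    · simp only [nV, h, if_false, List.map_cons, List.prod_cons]
      calc nV l c ≤ (l.map (fun e => e.2.length + 1)).prod := ih c
        _ ≤ (cs.length + 1) * (l.map (fun e => e.2.length + 1)).prod := by nlinarith

lemma dget?_mem {t : List (Int × List Int)} {c : Int} {cs : List Int}
    (h : dget? t c = some cs) : (c, cs) ∈ t := by
  induction t with
  | nil => simp [dget?] at h
  | cons e t ih =>
    obtain ⟨k, v⟩ := e
    by_cases hk : k = c
    · subst hk; simp [dget?] at h; subst h; exact List.mem_cons_self
    · simp [dget?, hk] at h; exact List.mem_cons_of_mem _ (ih h)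

lemma dget?_eq_of_mem {t : List (Int × List Int)} {k : Int} {cs : List Int}
    (hnd : (t.map Prod.fst).Nodup) (hm : (k, cs) ∈ t) : dget? t k = some cs := by
  induction t with
  | nil => simp at hm
  | cons e t ih =>
    obtain ⟨k', v'⟩ := e
    simp only [List.map_cons, List.nodup_cons] at hnd
    rcases List.mem_cons.mp hm with h | h
    · obtain ⟨rfl, rfl⟩ := Prod.mk.injEq .. ▸ h
      simp [dget?]
    · by_cases hk : k' = k
      · exact absurd (hk ▸ List.mem_map_of_mem h) hnd.1
      · simp [dget?, hk]; exact ih hnd.2 h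

lemma dget?_eq_none_iff (t : List (Int × List Int)) (k : Int) :
    dget? t k = none ↔ k ∉ t.map Prod.fst := by
  induction t with
  | nil => simp [dget?]
  | cons e t ih =>
    obtain ⟨k', v'⟩ := e
    by_cases hk : k' = k
    · subst hk; simp [dget?]
    · simp only [dget?, if_neg hk, List.map_cons, List.mem_cons, ih]
      constructor
      · intro h hm
        rcases hm with hm | hm
        · exact hk hm.symm
        · exact h hm
      · intro h hm
        exact h (Or.inr hm)

-- unfolding wsum over the FULL tree: one pop plus the children's contributions
lemma wsum_unfold {t : List (Int × List Int)} (hT : TopoOK t) (G P : Option Int)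
    (gp par cur : Int) :
    wsum G P t (gp, par, cur) =
      hit G P (gp, par, cur) + (((dget? t cur).getD []).map (fun c => wsum G P t (par, cur, c))).sum := by
  induction t generalizing gp par cur with
  | nil =>
    simp only [wsum, dget?, Option.getD_none, List.map_nil, List.sum_nil, add_zero]
  | cons en l ih =>
    obtain ⟨k, cs⟩ := en
    have hpw := List.pairwise_cons.mp hT.1
    have hself : k ∉ cs := hT.2 (k, cs) List.mem_cons_self
    have hTl : TopoOK l := ⟨hpw.2, fun e he => hT.2 e (List.mem_cons_of_mem _ he)⟩
    by_cases hk : k = cur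
    · subst hk
      simp only [wsum, dget?, eq_self_iff_true, if_true, Option.getD_some]
      congr 1
      refine congrArg _ (List.map_congr_left fun c hc => ?_)
      have : ¬ k = c := fun h => hself (h ▸ hc)
      simp [wsum, this]
    · have hlhs : wsum G P ((k, cs) :: l) (gp, par, cur) = wsum G P l (gp, par, cur) := by
        simp [wsum, hk]
      have hd : dget? ((k, cs) :: l) cur = dget? l cur := by simp [dget?, hk]
      rw [hlhs, hd, ih hTl]
      congr 1
      cases hdl : dget? l cur with
      | none => simp
      | some cs' =>
        have hmem : (cur, cs') ∈ l := dget?_mem hdl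
        simp only [Option.getD_some]
        refine congrArg _ (List.map_congr_left fun c hc => ?_)
        have : ¬ k = c := fun h => (hpw.1 (cur, cs') hmem) (h ▸ hc)
        simp [wsum, this]

lemma nV_unfold {t : List (Int × List Int)} (hT : TopoOK t) (cur : Int) :
    nV t cur = 1 + (((dget? t cur).getD []).map (fun c => nV t c)).sum := by
  induction t generalizing cur with
  | nil =>
    simp only [nV, dget?, Option.getD_none, List.map_nil, List.sum_nil, Nat.add_zero]
  | cons en l ih =>
    obtain ⟨k, cs⟩ := en
    have hpw := List.pairwise_cons.mp hT.1
    have hself : k ∉ cs := hT.2 (k, cs) List.mem_cons_self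
    have hTl : TopoOK l := ⟨hpw.2, fun e he => hT.2 e (List.mem_cons_of_mem _ he)⟩
    by_cases hk : k = cur
    · subst hk
      simp only [nV, dget?, eq_self_iff_true, if_true, Option.getD_some]
      congr 1
      refine congrArg _ (List.map_congr_left fun c hc => ?_)
      have : ¬ k = c := fun h => hself (h ▸ hc)
      simp [nV, this]
    · have hlhs : nV ((k, cs) :: l) cur = nV l cur := by simp [nV, hk]
      have hd : dget? ((k, cs) :: l) cur = dget? l cur := by simp [dget?, hk]
      rw [hlhs, hd, ih hTl]
      congr 1
      cases hdl : dget? l cur with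
      | none => simp
      | some cs' =>
        have hmem : (cur, cs') ∈ l := dget?_mem hdl
        simp only [Option.getD_some]
        refine congrArg _ (List.map_congr_left fun c hc => ?_)
        have : ¬ k = c := fun h => (hpw.1 (cur, cs') hmem) (h ▸ hc)
        simp [nV, this]

-- the BFS loop invariant: with enough fuel the loop returns cnt plus the queue entries' contributions
lemma bfs_inv {t : List (Int × List Int)} (hT : TopoOK t) (G P : Option Int) :
    ∀ (f : Nat) (cnt : Int) (q : List (Int × Int × Int)),
      (q.map (fun e => nV t e.2.2)).sum ≤ f →
      bfsLoop t G P f cnt q = cnt + (q.map (wsum G P t)).sum := by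
  intro f
  induction f with
  | zero =>
    intro cnt q hq
    cases q with
    | nil => simp [bfsLoop]
    | cons e q' =>
      exfalso
      simp only [List.map_cons, List.sum_cons, Nat.le_zero] at hq
      have := nV_pos t e.2.2
      omega
  | succ f ih =>
    intro cnt q hq
    cases q with
    | nil => simp [bfsLoop]
    | cons e q' =>
      obtain ⟨gp, par, cur⟩ := e
      simp only [List.map_cons, List.sum_cons] at hq
      have hcnt' : (if (some gp == G) && !(some par == P) then cnt + 1 else cnt) =
          cnt + hit G P (gp, par, cur) := by
        simp only [hit]; split <;> simp
      have hw := wsum_unfold hT G P gp par cur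
      have hn := nV_unfold hT cur
      cases hd : dget? t cur with
      | none =>
        rw [hd] at hw hn
        simp only [Option.getD_none, List.map_nil, List.sum_nil] at hw hn
        have hq' : (q'.map (fun e => nV t e.2.2)).sum ≤ f := by omega
        simp only [bfsLoop, hd]
        rw [hcnt', ih _ _ hq']
        simp only [List.map_cons, List.sum_cons]
        omega
      | some cs =>
        rw [hd] at hw hn
        simp only [Option.getD_some] at hw hn
        have hq'' : ((q' ++ cs.map (fun child => (par, cur, child))).map
            (fun e => nV t e.2.2)).sum ≤ f := by
          rw [List.map_append, List.sum_append]
          have hmm : ((cs.map (fun child => ((par, cur, child) : Int × Int × Int))).map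
              (fun e => nV t e.2.2)) = cs.map (fun c => nV t c) := by
            rw [List.map_map]; rfl
          rw [hmm]
          omega
        simp only [bfsLoop, hd]
        rw [hcnt', ih _ _ hq'']
        rw [List.map_append, List.sum_append]
        have hcomp : ((cs.map (fun child => ((par, cur, child) : Int × Int × Int))).map
            (wsum G P t)) = cs.map (fun c => wsum G P t (par, cur, c)) := by
          rw [List.map_map]; rfl
        rw [hcomp]
        simp only [List.map_cons, List.sum_cons]
        omega

-- A = wsum of the seed triple, on topological inputs (the product fuel dominates the pop count nV)
lemma A_eq_wsum {t : List (Int × List Int)} (hT : TopoOK t) (root me : Int) :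
    search_cousin t root me = wsum (myGrandparent t me) (myParent t me) t (0, 0, root) := by
  have h := bfs_inv hT (myGrandparent t me) (myParent t me)
    ((t.map (fun e => e.2.length + 1)).prod) 0 [(0, 0, root)]
    (by simpa using nV_le_prod t root)
  simpa [search_cousin] using h

-- with no grandparent every hit is 0, so the whole BFS counts 0
lemma wsum_none (P : Option Int) (l : List (Int × List Int)) (e : Int × Int × Int) :
    wsum none P l e = 0 := by
  induction l generalizing e with
  | nil => obtain ⟨gp, par, cur⟩ := e; simp [wsum, hit]
  | cons en l ih =>
    obtain ⟨k, cs⟩ := en; obtain ⟨gp, par, cur⟩ := e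
    by_cases h : k = cur <;> simp [wsum, h, hit]
    · exact List.sum_eq_zero fun x hx => by
        rcases List.mem_map.mp hx with ⟨c, _, rfl⟩
        exact ih _
    · exact ih _

lemma pvParent_none_iff (t : List (Int × List Int)) (x : Int) :
    pvParent t x = none ↔ x ∉ (t.map Prod.snd).flatten := by
  simp only [pvParent, Option.map_eq_none_iff, List.find?_eq_none, List.mem_flatten,
    decide_eq_true_eq]
  constructor
  · intro h hx
    rcases hx with ⟨l, hl, hx⟩
    rcases List.mem_map.mp hl with ⟨e, he, rfl⟩
    exact h e he hx
  · intro h e he hx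
    exact h ⟨e.2, List.mem_map_of_mem he, hx⟩

lemma pvParent_some {t : List (Int × List Int)} {x k : Int}
    (h : pvParent t x = some k) : ∃ cs, (k, cs) ∈ t ∧ x ∈ cs := by
  unfold pvParent at h
  rcases Option.map_eq_some_iff.mp h with ⟨e, he, rfl⟩
  refine ⟨e.2, ?_, by simpa using List.find?_some he⟩
  exact List.mem_of_find?_eq_some he

-- with one-parent trees, membership in an entry's child list determines the parent
lemma pv_of_entry {t : List (Int × List Int)} {k : Int} {cs : List Int} {x : Int}
    (hkids : ((t.map Prod.snd).flatten).Nodup) (hm : (k, cs) ∈ t) (hx : x ∈ cs) :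
    pvParent t x = some k := by
  induction t with
  | nil => simp at hm
  | cons e t ih =>
    obtain ⟨k', cs'⟩ := e
    simp only [List.map_cons, List.flatten_cons, List.nodup_append] at hkids
    rcases List.mem_cons.mp hm with h | h
    · obtain ⟨rfl, rfl⟩ := Prod.mk.injEq .. ▸ h
      simp [pvParent, List.find?_cons, hx]
    · have hxf : x ∈ (t.map Prod.snd).flatten :=
        List.mem_flatten.mpr ⟨cs, List.mem_map_of_mem h, hx⟩
      have hxn : x ∉ cs' := fun hc => (hkids.2.2 x hc x hxf) rfl
      simp [pvParent, List.find?_cons, hxn]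
      simpa [pvParent] using ih hkids.2.1 h

lemma wsum_cons_ne (G P : Option Int) (k : Int) (cs : List Int) (l : List (Int × List Int))
    (e : Int × Int × Int) (h : k ≠ e.2.2) :
    wsum G P ((k, cs) :: l) e = wsum G P l e := by
  obtain ⟨a, b, c⟩ := e
  simp [wsum, h]

lemma sum_map_const {α : Type} (L : List α) (c : Int) :
    (L.map (fun _ => c)).sum = (L.length : Int) * c := by
  induction L with
  | nil => simp
  | cons x L ih => simp [ih]; ring

-- THE FOREST LEMMA: processing a canonical queue over suffix l pops exactly the queue plus every child
-- in l once, with its canonical triple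
lemma forest {t : List (Int × List Int)} (hT : TopoOK t)
    (hkeys : (t.map Prod.fst).Nodup) (hkids : ((t.map Prod.snd).flatten).Nodup)
    (G P : Option Int) :
    ∀ (l starts : List _), (∃ l₁, t = l₁ ++ l) →
      (∀ k ∈ l.map Prod.fst, (starts.map (fun e => e.2.2)).count k + ((l.map Prod.snd).flatten).count k = 1) →
      (∀ e ∈ starts, e = canTrip t e.2.2) →
      (starts.map (wsum G P l)).sum =
        (starts.map (hit G P)).sum +
          (l.map (fun en => hit G P ((pvParent t en.1).getD 0, en.1, 0) * (en.2.length : Int))).sum := by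
  intro l
  induction l with
  | nil =>
    intro starts hsuf hcount hcan
    have hmc : starts.map (wsum G P []) = starts.map (hit G P) :=
      List.map_congr_left fun e _ => by obtain ⟨a, b, c⟩ := e; rfl
    rw [hmc]; simp
  | cons en l' ih =>
    obtain ⟨k, cs⟩ := en
    intro starts hsuf hcount hcan
    obtain ⟨l₁, ht⟩ := hsuf
    have hmem_t : (k, cs) ∈ t := by
      rw [ht]; exact List.mem_append_right _ List.mem_cons_self
    have hself : k ∉ cs := hT.2 _ hmem_t
    have hpw2 : List.Pairwise (fun a b => a.1 ∉ b.2) ((k, cs) :: l') := by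
      have hp : List.Pairwise (fun a b => a.1 ∉ b.2) (l₁ ++ (k, cs) :: l') := ht ▸ hT.1
      exact (List.pairwise_append.mp hp).2.1
    have hk_l' : ∀ b ∈ l', k ∉ b.2 := fun b hb => (List.pairwise_cons.mp hpw2).1 b hb
    have hkflat' : k ∉ (l'.map Prod.snd).flatten := by
      intro hx
      rcases List.mem_flatten.mp hx with ⟨csx, hcsx, hkx⟩
      rcases List.mem_map.mp hcsx with ⟨b, hb, rfl⟩
      exact hk_l' b hb hkx
    have hkkeys' : k ∉ l'.map Prod.fst := by
      have hkt := hkeys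
      rw [ht] at hkt
      simp only [List.map_append, List.map_cons] at hkt
      have h2 := (List.nodup_append.mp hkt).2.1
      exact (List.nodup_cons.mp h2).1
    have hck := hcount k (by simp)
    simp only [List.map_cons, List.flatten_cons, List.count_append] at hck
    have hkc0 : cs.count k = 0 := List.count_eq_zero.mpr hself
    have hkf0 : ((l'.map Prod.snd).flatten).count k = 0 := List.count_eq_zero.mpr hkflat'
    have hstark : (starts.map (fun e => e.2.2)).count k = 1 := by omega
    have hkmem : k ∈ starts.map (fun e => e.2.2) := List.count_pos_iff.mp (by omega)
    rcases List.mem_map.mp hkmem with ⟨e0, he0s, he0k⟩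
    obtain ⟨s1, s2, hsplit⟩ := List.append_of_mem he0s
    have he0can : e0 = canTrip t k := by
      have h := hcan e0 he0s; rw [he0k] at h; exact h
    have hz : (s1.map (fun e => e.2.2)).count k = 0 ∧ (s2.map (fun e => e.2.2)).count k = 0 := by
      rw [hsplit] at hstark
      simp only [List.map_append, List.map_cons, List.count_append, List.count_cons,
        he0k, beq_self_eq_true, if_true] at hstark
      constructor <;> omega
    have hs1ne : ∀ e ∈ s1, e.2.2 ≠ k := by
      intro e he hk'
      have hm : k ∈ s1.map (fun e => e.2.2) := hk' ▸ List.mem_map_of_mem he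
      exact absurd hm (List.count_eq_zero.mp hz.1)
    have hs2ne : ∀ e ∈ s2, e.2.2 ≠ k := by
      intro e he hk'
      have hm : k ∈ s2.map (fun e => e.2.2) := hk' ▸ List.mem_map_of_mem he
      exact absurd hm (List.count_eq_zero.mp hz.2)
    have hpvx : ∀ x ∈ cs, pvParent t x = some k := fun x hx => pv_of_entry hkids hmem_t hx
    have hchild : ∀ x ∈ cs, ((pvParent t k).getD 0, k, x) = canTrip t x := by
      intro x hx
      simp [canTrip, hpvx x hx]
    rw [hsplit]
    simp only [List.map_append, List.sum_append, List.map_cons, List.sum_cons]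
    have hS1 : s1.map (wsum G P ((k, cs) :: l')) = s1.map (wsum G P l') :=
      List.map_congr_left fun e he => wsum_cons_ne G P k cs l' e (fun h => hs1ne e he h.symm)
    have hS2 : s2.map (wsum G P ((k, cs) :: l')) = s2.map (wsum G P l') :=
      List.map_congr_left fun e he => wsum_cons_ne G P k cs l' e (fun h => hs2ne e he h.symm)
    have hE0 : wsum G P ((k, cs) :: l') e0 =
        hit G P e0 + (cs.map (fun x => wsum G P l' (canTrip t x))).sum := by
      rw [he0can]
      show wsum G P ((k, cs) :: l')
          (((pvParent t k).bind (fun p => pvParent t p)).getD 0, (pvParent t k).getD 0, k) =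
        hit G P (canTrip t k) + (cs.map (fun x => wsum G P l' (canTrip t x))).sum
      simp only [wsum, eq_self_iff_true, if_true]
      congr 1
      refine congrArg _ (List.map_congr_left fun x hx => ?_)
      rw [← hchild x hx]
    rw [hS1, hS2, hE0]
    have hthirds : (cs.map (canTrip t)).map (fun e => e.2.2) = cs := by
      rw [List.map_map]
      have h : ∀ x ∈ cs, ((fun (e : Int × Int × Int) => e.2.2) ∘ canTrip t) x = x := fun _ _ => rfl
      rw [List.map_congr_left h]
      exact List.map_id' cs
    have hcount' : ∀ k' ∈ l'.map Prod.fst,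
        ((((s1 ++ s2) ++ cs.map (canTrip t)).map (fun e => e.2.2)).count k') +
          ((l'.map Prod.snd).flatten).count k' = 1 := by
      intro k' hk'
      have hk'k : k' ≠ k := fun h => hkkeys' (h ▸ hk')
      have horig := hcount k' (by simp [hk'])
      rw [hsplit] at horig
      simp only [List.map_append, List.map_cons, List.flatten_cons, List.count_append,
        List.count_cons, he0k] at horig
      have hbeq : (k == k') = false := by simp [hk'k.symm]
      rw [hbeq] at horig
      simp only [Bool.false_eq_true, if_false] at horig
      simp only [List.map_append, List.count_append, hthirds]
      omega
    have hcan' : ∀ e ∈ (s1 ++ s2) ++ cs.map (canTrip t), e = canTrip t e.2.2 := by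
      intro e he
      rcases List.mem_append.mp he with he | he
      · rcases List.mem_append.mp he with he | he
        · exact hcan e (by rw [hsplit]; exact List.mem_append_left _ he)
        · exact hcan e (by
            rw [hsplit]
            exact List.mem_append_right _ (List.mem_cons_of_mem _ he))
      · rcases List.mem_map.mp he with ⟨x, hx, rfl⟩
        rfl
    have ihr := ih ((s1 ++ s2) ++ cs.map (canTrip t)) ⟨l₁ ++ [(k, cs)], by rw [ht]; simp⟩
      hcount' hcan'
    simp only [List.map_append, List.sum_append] at ihr
    have hmapcs : (cs.map (canTrip t)).map (wsum G P l') =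
        cs.map (fun x => wsum G P l' (canTrip t x)) := by
      rw [List.map_map]; rfl
    have hmapcsh : (cs.map (canTrip t)).map (hit G P) =
        cs.map (fun _ => hit G P ((pvParent t k).getD 0, k, 0)) := by
      rw [List.map_map]
      refine List.map_congr_left fun x hx => ?_
      show hit G P (canTrip t x) = hit G P ((pvParent t k).getD 0, k, 0)
      rw [← hchild x hx]
      simp [hit]
    rw [hmapcs, hmapcsh] at ihr
    rw [sum_map_const] at ihr
    have hcomm : (cs.length : Int) * hit G P ((pvParent t k).getD 0, k, 0) =
        hit G P ((pvParent t k).getD 0, k, 0) * (cs.length : Int) := mul_comm _ _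
    linarith [ihr]

-- regrouping: summing the child-list lengths over the grandparent's child list L equals summing over
-- the tree entries whose key lies in L
lemma bridge {p : Int} :
    ∀ (t L : List _), (t.map (Prod.fst (α := Int) (β := List Int))).Nodup → L.Nodup →
      (L.map (fun c => if c = p then 0 else (((dget? t c).getD []).length : Int))).sum =
        (t.map (fun en => if en.1 ∈ L ∧ en.1 ≠ p then (en.2.length : Int) else 0)).sum := by
  intro t
  induction t with
  | nil =>
    intro L _ _
    simp only [List.map_nil, List.sum_nil]
    have h : ∀ c ∈ L,
        (if c = p then (0 : Int) else (((dget? ([] : List (Int × List Int)) c).getD []).length : Int))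
          = (fun (_ : Int) => (0 : Int)) c := by
      intro c _; by_cases hc : c = p <;> simp [hc, dget?]
    rw [List.map_congr_left h, sum_map_const]
    ring
  | cons en t' ih =>
    obtain ⟨k, cs⟩ := en
    intro L hnd hL
    simp only [List.map_cons] at hnd
    have hknd : k ∉ t'.map Prod.fst := (List.nodup_cons.mp hnd).1
    have hnd' : (t'.map Prod.fst).Nodup := (List.nodup_cons.mp hnd).2
    by_cases hkL : k ∈ L
    · obtain ⟨L1, L2, rfl⟩ := List.append_of_mem hkL
      have hdec := List.nodup_append.mp hL
      have hkL1 : k ∉ L1 := fun h => hdec.2.2 k h k List.mem_cons_self rfl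
      have hkL2 : k ∉ L2 := (List.nodup_cons.mp hdec.2.1).1
      have hL12 : (L1 ++ L2).Nodup :=
        List.nodup_append.mpr ⟨hdec.1, (List.nodup_cons.mp hdec.2.1).2,
          fun a ha b hb => hdec.2.2 a ha b (List.mem_cons_of_mem _ hb)⟩
      simp only [List.map_append, List.sum_append, List.map_cons, List.sum_cons]
      have hf1 : L1.map (fun c => if c = p then (0 : Int) else (((dget? ((k, cs) :: t') c).getD []).length : Int))
          = L1.map (fun c => if c = p then (0 : Int) else (((dget? t' c).getD []).length : Int)) := by
        refine List.map_congr_left fun c hc => ?_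
        have hck : ¬ k = c := fun h => hkL1 (h ▸ hc)
        simp [dget?, hck]
      have hf2 : L2.map (fun c => if c = p then (0 : Int) else (((dget? ((k, cs) :: t') c).getD []).length : Int))
          = L2.map (fun c => if c = p then (0 : Int) else (((dget? t' c).getD []).length : Int)) := by
        refine List.map_congr_left fun c hc => ?_
        have hck : ¬ k = c := fun h => hkL2 (h ▸ hc)
        simp [dget?, hck]
      have hfk : (if k = p then (0 : Int) else (((dget? ((k, cs) :: t') k).getD []).length : Int))
          = (if k ∈ L1 ++ k :: L2 ∧ k ≠ p then (cs.length : Int) else 0) := by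
        by_cases hkp : k = p <;> simp [dget?, hkp, hkL]
      have htl : t'.map (fun en => if en.1 ∈ L1 ++ k :: L2 ∧ en.1 ≠ p then (en.2.length : Int) else 0)
          = t'.map (fun en => if en.1 ∈ L1 ++ L2 ∧ en.1 ≠ p then (en.2.length : Int) else 0) := by
        refine List.map_congr_left fun en hen => ?_
        have hne : en.1 ≠ k := fun h => hknd (h ▸ List.mem_map_of_mem hen)
        simp [List.mem_append, List.mem_cons, hne]
      rw [hf1, hf2, hfk, htl]
      have ihh := ih (L1 ++ L2) hnd' hL12
      simp only [List.map_append, List.sum_append] at ihh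
      omega
    · simp only [List.map_cons, List.sum_cons]
      have hf : L.map (fun c => if c = p then (0 : Int) else (((dget? ((k, cs) :: t') c).getD []).length : Int))
          = L.map (fun c => if c = p then (0 : Int) else (((dget? t' c).getD []).length : Int)) := by
        refine List.map_congr_left fun c hc => ?_
        have hck : ¬ k = c := fun h => hkL (h ▸ hc)
        simp [dget?, hck]
      have hhead : (if k ∈ L ∧ k ≠ p then (cs.length : Int) else 0) = 0 := by simp [hkL]
      rw [hf, ih L hnd' hL, hhead]
      omega

lemma myGrandparent_eq_pv (t : List (Int × List Int)) (me : Int) :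
    myGrandparent t me = pvGrand t me := by
  unfold myGrandparent pvGrand
  rw [myParent_eq_pv]
  cases pvParent t me <;> simp [myParent_eq_pv]

-- Source B's accumulation loop as a sum
lemma foldl_count (tree : List (Int × List Int)) (p : Int) :
    ∀ (L : List Int) (a : Int),
      L.foldl (fun (total : Int) c => if some c == some p then total
        else total + (((dget? tree c).getD []).length : Int)) a =
      a + (L.map (fun c => if c = p then (0 : Int) else (((dget? tree c).getD []).length : Int))).sum := by
  intro L
  induction L with
  | nil => intro a; simp
  | cons c L ihl =>
    intro a
    simp only [List.foldl_cons, List.map_cons, List.sum_cons]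
    by_cases hc : c = p
    · rw [if_pos (by simp [hc]), ihl, if_pos hc]
      omega
    · rw [if_neg (by simp [hc]), ihl, if_neg hc]
      omega

-- A as a per-entry sum over the proper tree (the forest lemma applied to the seed queue)
lemma A_formula {tree : List (Int × List Int)} {root me g p : Int}
    (hT : TopoOK tree) (hshape : TreeShape tree root)
    (hp : pvParent tree me = some p) (hg : pvParent tree p = some g) :
    search_cousin tree root me =
      hit (some g) (some p) (0, 0, root) +
        (tree.map (fun en =>
          hit (some g) (some p) ((pvParent tree en.1).getD 0, en.1, 0) * (en.2.length : Int))).sum := by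
  have hPm : myParent tree me = some p := by rw [myParent_eq_pv]; exact hp
  have hGm : myGrandparent tree me = some g := by
    unfold myGrandparent
    rw [hPm]
    show myParent tree p = some g
    rw [myParent_eq_pv]; exact hg
  rw [A_eq_wsum hT, hPm, hGm]
  have hroot_nokid : root ∉ (tree.map Prod.snd).flatten := hshape.2.2.1
  have hcount : ∀ k ∈ tree.map Prod.fst,
      (([((0 : Int), (0 : Int), root)]).map (fun e => e.2.2)).count k +
        ((tree.map Prod.snd).flatten).count k = 1 := by
    intro k hk
    rcases hshape.2.2.2 k hk with rfl | hkkid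
    · have h0 : ((tree.map Prod.snd).flatten).count k = 0 := List.count_eq_zero.mpr hroot_nokid
      simp [h0]
    · have h1le : 1 ≤ ((tree.map Prod.snd).flatten).count k := List.count_pos_iff.mpr hkkid
      have hle1 : ((tree.map Prod.snd).flatten).count k ≤ 1 :=
        List.nodup_iff_count_le_one.mp hshape.2.1 k
      have hkr : k ≠ root := fun h => hroot_nokid (h ▸ hkkid)
      have hz : (([((0 : Int), (0 : Int), root)]).map (fun e => e.2.2)).count k = 0 := by
        simp [List.count_cons, hkr.symm]
      omega
  have hcan : ∀ e ∈ [((0 : Int), (0 : Int), root)], e = canTrip tree e.2.2 := by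
    intro e he
    simp only [List.mem_singleton] at he
    subst he
    have hnone : pvParent tree root = none := (pvParent_none_iff tree root).mpr hroot_nokid
    simp [canTrip, hnone]
  have hfor := forest hT hshape.1 hshape.2.1 (some g) (some p) tree
    [((0 : Int), (0 : Int), root)] ⟨[], rfl⟩ hcount hcan
  simpa using hfor

-- B as the bridge's entry sum
lemma B_formula {tree : List (Int × List Int)} {root me g p : Int}
    (hshape : TreeShape tree root)
    (hp : pvParent tree me = some p) (hg : pvParent tree p = some g) :
    search_cousin_alt tree root me =
      (tree.map (fun en =>
        if en.1 ∈ ((dget? tree g).getD []) ∧ en.1 ≠ p then (en.2.length : Int) else 0)).sum := by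
  obtain ⟨csg, hmemg, hpcs⟩ := pvParent_some hg
  have hdg : dget? tree g = some csg := dget?_eq_of_mem hshape.1 hmemg
  have hnodupg : csg.Nodup :=
    (List.sublist_flatten_of_mem (List.mem_map_of_mem hmemg)).nodup hshape.2.1
  have halt : search_cousin_alt tree root me =
      ((dget? tree g).getD []).foldl (fun (total : Int) c => if some c == some p then total
        else total + (((dget? tree c).getD []).length : Int)) (0 : Int) := by
    unfold search_cousin_alt
    rw [myParent_eq_pv, hp]
    simp only [myParent_eq_pv, hg]
  rw [halt, foldl_count, hdg]
  simp only [Option.getD_some, zero_add]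
  exact bridge tree csg hshape.1 hnodupg

-- ===== permutation transfer: both ports read the dict only through its (unique-key) lookups =====

lemma dget?_perm {t t' : List (Int × List Int)} (h : t.Perm t')
    (hnd : (t.map Prod.fst).Nodup) (k : Int) : dget? t k = dget? t' k := by
  have hnd' : (t'.map Prod.fst).Nodup := ((h.map Prod.fst).nodup_iff).mp hnd
  cases hdt : dget? t k with
  | some cs => exact (dget?_eq_of_mem hnd' (h.mem_iff.mp (dget?_mem hdt))).symm
  | none =>
    cases hdt' : dget? t' k with
    | none => rfl
    | some cs =>
      have : (k, cs) ∈ t := h.mem_iff.mpr (dget?_mem hdt')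
      rw [dget?_eq_of_mem hnd this] at hdt
      cases hdt

lemma pvParent_perm {t t' : List (Int × List Int)} (h : t.Perm t')
    (hkids : ((t.map Prod.snd).flatten).Nodup) (x : Int) : pvParent t x = pvParent t' x := by
  have hflat : ((t.map Prod.snd).flatten).Perm ((t'.map Prod.snd).flatten) := (h.map Prod.snd).flatten
  have hkids' : ((t'.map Prod.snd).flatten).Nodup := hflat.nodup_iff.mp hkids
  cases hp : pvParent t x with
  | none =>
    have hx : x ∉ (t.map Prod.snd).flatten := (pvParent_none_iff t x).mp hp
    exact ((pvParent_none_iff t' x).mpr (fun hm => hx (hflat.mem_iff.mpr hm))).symm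
  | some k =>
    obtain ⟨cs, hm, hxc⟩ := pvParent_some hp
    exact (pv_of_entry hkids' (h.mem_iff.mp hm) hxc).symm

lemma bfsLoop_congr {t t' : List (Int × List Int)} (hd : ∀ c, dget? t c = dget? t' c)
    (G P : Option Int) : ∀ (f : Nat) (cnt : Int) (q : List (Int × Int × Int)),
      bfsLoop t G P f cnt q = bfsLoop t' G P f cnt q := by
  intro f
  induction f with
  | zero => intro cnt q; rfl
  | succ f ih =>
    intro cnt q
    cases q with
    | nil => rfl
    | cons e q' =>
      obtain ⟨gp, par, cur⟩ := e
      simp only [bfsLoop, hd cur]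
      cases dget? t' cur <;> exact ih _ _

lemma A_perm {t t' : List (Int × List Int)} (h : t.Perm t')
    (hnd : (t.map Prod.fst).Nodup) (hkids : ((t.map Prod.snd).flatten).Nodup)
    (root me : Int) : search_cousin t root me = search_cousin t' root me := by
  unfold search_cousin
  have hmp : ∀ x, myParent t x = myParent t' x := fun x => by
    rw [myParent_eq_pv, myParent_eq_pv, pvParent_perm h hkids]
  have hmg : myGrandparent t me = myGrandparent t' me := by
    unfold myGrandparent
    rw [hmp me]
    cases myParent t' me <;> simp [hmp]
  have hfuel : (t.map (fun e => e.2.length + 1)).prod = (t'.map (fun e => e.2.length + 1)).prod :=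
    (h.map _).prod_eq
  rw [hmg, hmp me, hfuel, bfsLoop_congr (dget?_perm h hnd)]

lemma B_perm {t t' : List (Int × List Int)} (h : t.Perm t')
    (hnd : (t.map Prod.fst).Nodup) (hkids : ((t.map Prod.snd).flatten).Nodup)
    (root me : Int) : search_cousin_alt t root me = search_cousin_alt t' root me := by
  unfold search_cousin_alt
  have hmp : ∀ x, myParent t x = myParent t' x := fun x => by
    rw [myParent_eq_pv, myParent_eq_pv, pvParent_perm h hkids]
  have hdg : ∀ c, dget? t c = dget? t' c := dget?_perm h hnd
  have hfun : (fun (total : Int) (c : Int) => if some c == myParent t me then total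
        else total + (((dget? t c).getD []).length : Int)) =
      (fun (total : Int) (c : Int) => if some c == myParent t' me then total
        else total + (((dget? t' c).getD []).length : Int)) := by
    funext total c
    rw [hmp me, hdg c]
  have hgcs : (match (match myParent t me with | none => none | some p => myParent t p) with
        | none => ([] : List Int) | some g => (dget? t g).getD []) =
      (match (match myParent t' me with | none => none | some p => myParent t' p) with
        | none => ([] : List Int) | some g => (dget? t' g).getD []) := by
    rw [hmp me]
    cases myParent t' me with
    | none => rfl
    | some p =>
      show (match myParent t p with
          | none => ([] : List Int) | some g => (dget? t g).getD []) =
        (match myParent t' p with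
          | none => ([] : List Int) | some g => (dget? t' g).getD [])
      rw [hmp p]
      cases myParent t' p with
      | none => rfl
      | some g => exact congrArg (fun o => Option.getD o []) (hdg g)
  exact congrArg₂ (fun (L : List Int) (f : Int → Int → Int) => L.foldl f 0) hgcs hfun

-- ===== depth facts and the topological reordering =====

lemma pvDepth_mono {t : List (Int × List Int)} {root : Int} :
    ∀ {f f' : Nat} {k : Int} {d : Nat}, f ≤ f' →
      pvDepth t root f k = some d → pvDepth t root f' k = some d := by
  intro f
  induction f with
  | zero => intro f' k d _ h; simp [pvDepth] at h
  | succ f ih =>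
    intro f' k d hle h
    obtain ⟨f'', rfl⟩ : ∃ f'', f' = f'' + 1 := ⟨f' - 1, by omega⟩
    simp only [pvDepth] at h ⊢
    by_cases hk : k = root
    · simpa [hk] using h
    · simp only [hk, if_false] at h ⊢
      cases hp : pvParent t k with
      | none => rw [hp] at h; cases h
      | some p =>
        simp only [hp] at h ⊢
        rcases Option.map_eq_some_iff.mp h with ⟨d', hd', rfl⟩
        rw [ih (by omega) hd']
        rfl

lemma depth_child {t : List (Int × List Int)} {root : Int}
    (hkids : ((t.map Prod.snd).flatten).Nodup) (hroot : root ∉ (t.map Prod.snd).flatten)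
    {bk : Int} {bcs : List Int} (hb : (bk, bcs) ∈ t) {c : Int} (hc : c ∈ bcs) (F : Nat) :
    pvDepth t root (F + 1) c = (pvDepth t root F bk).map (· + 1) := by
  have hcr : c ≠ root := fun h =>
    hroot (h ▸ List.mem_flatten.mpr ⟨bcs, List.mem_map_of_mem hb, hc⟩)
  have hp : pvParent t c = some bk := pv_of_entry hkids hb hc
  simp [pvDepth, hcr, hp]

lemma good_to_topo {t : List (Int × List Int)} {root : Int} (hg : GoodTree t root) :
    ∃ t', t.Perm t' ∧ TopoOK t' ∧ TreeShape t' root := by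
  classical
  obtain ⟨hkeys, hkids, hroot, hdep⟩ := hg
  set F := t.length + 2 with hF
  set key : (Int × List Int) → Nat := fun e => (pvDepth t root F e.1).getD 0 with hkey
  set t' := t.mergeSort (fun a b => decide (key a ≤ key b)) with ht'
  have hperm : t.Perm t' := (List.mergeSort_perm t _).symm
  have hkeysome : ∀ e ∈ t, ∃ d, pvDepth t root (t.length + 1) e.1 = some d := by
    intro e he
    have := hdep e.1 (List.mem_map_of_mem he)
    exact Option.isSome_iff_exists.mp this
  have hkeyrel : ∀ a ∈ t, ∀ b ∈ t, a.1 ∈ b.2 → key b + 1 = key a := by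
    intro a ha b hb hab
    obtain ⟨db, hdb⟩ := hkeysome b hb
    have hdbF : pvDepth t root F b.1 = some db := pvDepth_mono (by omega) hdb
    have hda : pvDepth t root F a.1 = (pvDepth t root (t.length + 1) b.1).map (· + 1) := by
      have := depth_child hkids hroot (bk := b.1) (bcs := b.2) (by simpa using hb) hab (t.length + 1)
      simpa [hF] using this
    rw [hdb] at hda
    simp [hkey, hda, hdbF]
  have hpair : t'.Pairwise (fun a b => key a ≤ key b) := by
    have h := List.sorted_mergeSort (le := fun a b => decide (key a ≤ key b))
      (by intro a b c h1 h2; simp at *; omega) (by intro a b; simp; omega) t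
    exact h.imp (by simp)
  refine ⟨t', hperm, ⟨?_, ?_⟩, ?_, ?_, ?_, ?_⟩
  · refine hpair.imp_of_mem ?_
    intro a b ha hb hle hab
    have := hkeyrel a (hperm.mem_iff.mpr ha) b (hperm.mem_iff.mpr hb) hab
    omega
  · intro e he hee
    have := hkeyrel e (hperm.mem_iff.mpr he) e (hperm.mem_iff.mpr he) hee
    omega
  · exact ((hperm.map Prod.fst).nodup_iff).mp hkeys
  · exact ((hperm.map Prod.snd).flatten.nodup_iff).mp hkids
  · exact fun hm => hroot (((hperm.map Prod.snd).flatten.mem_iff).mpr hm)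
  · intro k hk
    have hkt : k ∈ t.map Prod.fst := ((hperm.map Prod.fst).mem_iff).mpr hk
    by_cases hkr : k = root
    · exact Or.inl hkr
    · right
      have hds := hdep k hkt
      obtain ⟨d, hd⟩ := Option.isSome_iff_exists.mp hds
      have : pvParent t k ≠ none := by
        intro hp
        obtain ⟨m, hm⟩ : ∃ m, t.length + 1 = m + 1 := ⟨t.length, rfl⟩
        rw [hm] at hd
        simp [pvDepth, hkr, hp] at hd
      cases hp : pvParent t k with
      | none => exact absurd hp this
      | some p =>
        obtain ⟨cs, hmem, hkc⟩ := pvParent_some hp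
        have : k ∈ (t.map Prod.snd).flatten :=
          List.mem_flatten.mpr ⟨cs, List.mem_map_of_mem hmem, hkc⟩
        exact ((hperm.map Prod.snd).flatten.mem_iff).mp this

-- ===== the agreement core on a topologically ordered proper tree =====

lemma core_eq {tree : List (Int × List Int)} {root me : Int}
    (hT : TopoOK tree) (hshape : TreeShape tree root)
    (hnd : pvGrand tree me ≠ some 0) :
    search_cousin tree root me = search_cousin_alt tree root me := by
  cases hgc : pvGrand tree me with
  | none =>
    have hGm : myGrandparent tree me = none := by rw [myGrandparent_eq_pv, hgc]
    have halt : search_cousin_alt tree root me = 0 := by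
      unfold search_cousin_alt
      rw [myParent_eq_pv]
      cases hpm : pvParent tree me with
      | none => simp
      | some p =>
        have hpn : pvParent tree p = none := by simpa [pvGrand, hpm] using hgc
        simp [myParent_eq_pv, hpn]
    rw [A_eq_wsum hT, hGm, wsum_none, halt]
  | some g =>
    obtain ⟨p, hp, hg⟩ : ∃ p, pvParent tree me = some p ∧ pvParent tree p = some g := by
      unfold pvGrand at hgc
      cases hpm : pvParent tree me with
      | none => rw [hpm] at hgc; cases hgc
      | some p => rw [hpm] at hgc; exact ⟨p, rfl, hgc⟩
    have hgne : g ≠ 0 := fun h => hnd (by rw [hgc, h])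
    rw [A_formula hT hshape hp hg, B_formula hshape hp hg]
    have hhead : hit (some g) (some p) (0, 0, root) = 0 := by
      simp [hit, Ne.symm hgne]
    obtain ⟨csg, hmemg, hpcs⟩ := pvParent_some hg
    have hdg : dget? tree g = some csg := dget?_eq_of_mem hshape.1 hmemg
    have hentry : ∀ en ∈ tree,
        hit (some g) (some p) ((pvParent tree en.1).getD 0, en.1, 0) * (en.2.length : Int) =
        (if en.1 ∈ ((dget? tree g).getD []) ∧ en.1 ≠ p then (en.2.length : Int) else 0) := by
      intro en _
      rw [hdg]
      simp only [Option.getD_some]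
      have hiff : ((pvParent tree en.1).getD 0 = g ∧ en.1 ≠ p) ↔ (en.1 ∈ csg ∧ en.1 ≠ p) := by
        constructor
        · rintro ⟨h1, h2⟩
          refine ⟨?_, h2⟩
          cases hpv : pvParent tree en.1 with
          | none => rw [hpv] at h1; simp at h1; exact absurd h1.symm hgne
          | some g' =>
            rw [hpv] at h1; simp at h1
            obtain ⟨cs', hmem', hin'⟩ := pvParent_some hpv
            have hdgg : dget? tree g' = some cs' := dget?_eq_of_mem hshape.1 hmem'
            rw [h1, hdg] at hdgg
            injection hdgg with hcs
            exact hcs ▸ hin'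
        · rintro ⟨h1, h2⟩
          have := pv_of_entry hshape.2.1 hmemg h1
          simp [this, h2]
      by_cases hc : en.1 ∈ csg ∧ en.1 ≠ p
      · have hc' := hiff.mpr hc
        simp only [hit, if_pos hc]
        have hb : ((some ((pvParent tree en.1).getD 0) == some g) &&
            !(some en.1 == some p)) = true := by
          simp [hc'.1, hc'.2]
        rw [hb]
        simp
      · have hc' : ¬ ((pvParent tree en.1).getD 0 = g ∧ en.1 ≠ p) := fun h => hc (hiff.mp h)
        simp only [hit, if_neg hc]
        have hb : ((some ((pvParent tree en.1).getD 0) == some g) &&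
            !(some en.1 == some p)) = false := by
          by_cases h2 : en.1 = p
          · simp [h2]
          · have h1 : ¬ ((pvParent tree en.1).getD 0 = g) := fun h1 => hc' ⟨h1, h2⟩
            simp [h1]
        rw [hb]
        simp
    rw [hhead, List.map_congr_left hentry]
    ring

lemma bfsLoop_nil (t : List (Int × List Int)) (G P : Option Int) (f : Nat) (c : Int) :
    bfsLoop t G P f c [] = c := by cases f <;> rfl

-- the degenerate admitted case: root keys nothing and me has no grandparent — both return 0
lemma trivial_eq {tree : List (Int × List Int)} {root me : Int}
    (hgn : pvGrand tree me = none) (hrk : root ∉ tree.map Prod.fst) :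
    search_cousin tree root me = search_cousin_alt tree root me := by
  have hGm : myGrandparent tree me = none := by rw [myGrandparent_eq_pv, hgn]
  have hdr : dget? tree root = none := (dget?_eq_none_iff tree root).mpr hrk
  obtain ⟨f, hf⟩ : ∃ f, (tree.map (fun e => e.2.length + 1)).prod = f + 1 :=
    ⟨(tree.map (fun e => e.2.length + 1)).prod - 1, by have := prodFuel_pos tree; omega⟩
  have hA : search_cousin tree root me = 0 := by
    unfold search_cousin
    rw [hGm, hf]
    simp only [bfsLoop, hdr]
    exact bfsLoop_nil _ _ _ _ _
  have hB : search_cousin_alt tree root me = 0 := by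
    unfold search_cousin_alt
    rw [myParent_eq_pv]
    cases hpm : pvParent tree me with
    | none => simp
    | some p =>
      have hpn : pvParent tree p = none := by simpa [pvGrand, hpm] using hgn
      simp [myParent_eq_pv, hpn]
  rw [hA, hB]

lemma main_eq (tree : List (Int × List Int)) (root me : Int)
    (hpre : Pre_search_cousin tree root me) (hnd : ¬ D_search_cousin tree root me) :
    search_cousin tree root me = search_cousin_alt tree root me := by
  rcases hpre with hg | ⟨hgn, hrk⟩
  · obtain ⟨t', hperm, hT', hshape'⟩ := good_to_topo hg
    have hgrand : pvGrand t' me = pvGrand tree me := by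
      unfold pvGrand
      rw [pvParent_perm hperm hg.2.1 me]
      cases pvParent t' me <;> simp [pvParent_perm hperm hg.2.1]
    rw [A_perm hperm hg.1 hg.2.1, B_perm hperm hg.1 hg.2.1]
    exact core_eq hT' hshape' (by rw [hgrand]; exact hnd)
  · exact trivial_eq hgn hrk

-- the strict-inequality core on a topologically ordered proper tree whose grandparent is node 0
lemma core_ne {tree : List (Int × List Int)} {root me : Int}
    (hT : TopoOK tree) (hshape : TreeShape tree root)
    (hgc : pvGrand tree me = some 0) :
    search_cousin tree root me ≠ search_cousin_alt tree root me := by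
  obtain ⟨p, hp, hg⟩ : ∃ p, pvParent tree me = some p ∧ pvParent tree p = some 0 := by
    unfold pvGrand at hgc
    cases hpm : pvParent tree me with
    | none => rw [hpm] at hgc; cases hgc
    | some p => rw [hpm] at hgc; exact ⟨p, rfl, hgc⟩
  obtain ⟨cs0, hmem0, hpcs0⟩ := pvParent_some hg
  have hpne : p ≠ 0 := by
    intro h
    exact hT.2 (0, cs0) hmem0 (by simpa [h] using hpcs0)
  have hhead : hit (some 0) (some p) (0, 0, root) = 1 := by
    simp [hit, Ne.symm hpne]
  have hdg : dget? tree 0 = some cs0 := dget?_eq_of_mem hshape.1 hmem0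
  have hentry : ∀ en ∈ tree,
      (if en.1 ∈ ((dget? tree (0 : Int)).getD []) ∧ en.1 ≠ p then (en.2.length : Int) else 0) ≤
        hit (some 0) (some p) ((pvParent tree en.1).getD 0, en.1, 0) * (en.2.length : Int) := by
    intro en _
    rw [hdg]
    simp only [Option.getD_some]
    by_cases hc : en.1 ∈ cs0 ∧ en.1 ≠ p
    · have hpv : pvParent tree en.1 = some 0 := pv_of_entry hshape.2.1 hmem0 hc.1
      have hb : ((some ((pvParent tree en.1).getD 0) == some (0 : Int)) &&
          !(some en.1 == some p)) = true := by
        simp [hpv, hc.2]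
      simp only [hit, if_pos hc, hb, if_true]
      simp
    · simp only [if_neg hc]
      have h1 : (0 : Int) ≤ hit (some 0) (some p) ((pvParent tree en.1).getD 0, en.1, 0) := by
        unfold hit; split <;> omega
      have h2 : (0 : Int) ≤ (en.2.length : Int) := by positivity
      positivity
  have hsum := List.sum_le_sum hentry
  have hA := A_formula hT hshape hp hg
  have hB := B_formula hshape hp hg
  rw [hA, hB, hhead]
  intro heq
  omega

-- ===== VERDICT =====
theorem search_cousin_spec : Claim_unchanged_search_cousin := by
  intro tree root me _ hpre hnd
  exact main_eq tree root me hpre hnd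

theorem search_cousin_changed : Claim_changed_search_cousin := by
  unfold Claim_changed_search_cousin
  decide

theorem search_cousin_tight : Claim_exact_search_cousin := by
  intro tree root me _ hpre hd
  have hgc : pvGrand tree me = some 0 := hd
  rcases hpre with hg | ⟨hgn, _⟩
  · obtain ⟨t', hperm, hT', hshape'⟩ := good_to_topo hg
    have hgrand : pvGrand t' me = pvGrand tree me := by
      unfold pvGrand
      rw [pvParent_perm hperm hg.2.1 me]
      cases pvParent t' me <;> simp [pvParent_perm hperm hg.2.1]
    rw [A_perm hperm hg.1 hg.2.1, B_perm hperm hg.1 hg.2.1]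
    exact core_ne hT' hshape' (by rw [hgrand]; exact hgc)
  · rw [hgn] at hgc; cases hgc
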